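-- pv_equiv track=rewrite | github.com/epfl-ada/ada-2022-project-toestewbrr | coreNLP_analysis.py | aggregate_characters
-- ===== SOURCE A (Python) =====
-- def get_full_name(string, characters):
--     '''
--     Find the longest name of a given character in a list of character names.
--     Input:
--         string: character name (partial or full)
--         characters: list of character names
--     Output:
--         full_name: longest name of character found in characters
--     '''
--     names = string.split(' ')
--     max_length = 0
--     for character in characters:
--         char_names = character.split(' ')
--         if set(names) <= set(char_names):
--             num_names = len(char_names)
--             if num_names > max_length:
--                 max_length = num_names
--                 full_name = character
--     return full_name
--
-- def aggregate_characters(characters):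
--     '''
--     Input: list of characters
--     Output: dictionary of (full name : number of times name is mentioned in list)
--     Example: ['Harry Potter', 'Voldemort', 'Harry'] -> {'Harry Potter': 2, 'Voldemort': 1}
--     '''
--     character_dict = dict()
--     for character in characters:
--         full_character = get_full_name(character, characters)
--         if full_character in character_dict:
--             character_dict[full_character] += 1
--         else:
--             character_dict[full_character] = 1
--     return character_dict
-- ===== SOURCE B (Python) =====
-- def aggregate_characters(characters):
--     ''' Inverted-index re-implementation: token -> posting list of indices,
--     resolve each mention by intersecting posting lists, then tally. '''
--     index = {}
--     for i, ch in enumerate(characters):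
--         for tok in dict.fromkeys(ch.split(' ')):
--             index.setdefault(tok, []).append(i)
--
--     counts = {}
--     for ch in characters:
--         toks = ch.split(' ')
--         cands = index.get(toks[0], [])
--         for tok in toks[1:]:
--             posting = set(index.get(tok, []))
--             cands = [i for i in cands if i in posting]
--         best_len = 0
--         best = None
--         for i in cands:
--             k = len(characters[i].split(' '))
--             if k > best_len:
--                 best_len = k
--                 best = characters[i]
--         counts[best] = counts.get(best, 0) + 1
--     return counts
-- ===== Notes on version B (the rewrite author's own statement) =====
-- stated objective: faster
-- what changed: Replaces A's per-mention rescan of the whole character list with an inverted index from token to posting list of indices; each mention is resolved by intersecting the posting lists of its tokens before taking the longest (first-wins) candidate and tallying with a counter dict.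
import Mathlib
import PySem

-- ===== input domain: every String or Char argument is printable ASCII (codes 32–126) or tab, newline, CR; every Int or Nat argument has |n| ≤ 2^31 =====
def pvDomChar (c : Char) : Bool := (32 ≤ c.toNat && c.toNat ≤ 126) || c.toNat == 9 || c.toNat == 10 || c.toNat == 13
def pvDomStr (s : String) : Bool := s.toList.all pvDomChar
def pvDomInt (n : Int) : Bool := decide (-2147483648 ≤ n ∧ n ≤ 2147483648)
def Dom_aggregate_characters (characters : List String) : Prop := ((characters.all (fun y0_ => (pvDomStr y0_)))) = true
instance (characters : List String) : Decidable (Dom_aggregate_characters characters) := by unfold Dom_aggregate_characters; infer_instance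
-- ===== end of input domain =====

-- B replaces A's per-mention scan of the whole list by an inverted index (token -> posting list
-- of indices) intersected per mention, removing the inner scan over all characters (objective: faster; measured).

-- shared tokenizer: Python's s.split(' ')  (sep " " is nonempty, so split? always returns some)
def pvSplitSp (s : String) : List String := (PySem.Str.split? s " ").getD []

-- ===== PORT A =====
-- get_full_name's running (max_length, full_name) pair; full_name starts unbound (none).
-- Python would raise UnboundLocalError if no superset existed; aggregate_characters always passes
-- a member of `characters` (a superset of itself), so the final .getD "" is never observed there.
def get_full_name (string : String) (characters : List String) : String :=
  let names := pvSplitSp string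
  let st := characters.foldl
    (fun (st : Int × Option String) character =>
      let char_names := pvSplitSp character
      if PySem.Set.issubset (PySem.Set.ofList names) (PySem.Set.ofList char_names) then
        (if (char_names.length : Int) > st.1 then ((char_names.length : Int), some character) else st)
      else st)
    (0, none)
  st.2.getD ""

def aggregate_characters (characters : List String) : List (String × Int) :=
  (characters.foldl
    (fun (d : PySem.Dict String Int) character =>
      let full_character := get_full_name character characters
      if d.contains full_character then d.insert full_character (d.getD full_character 0 + 1)
      else d.insert full_character 1)
    PySem.Dict.empty).items

-- ===== PORT B =====
-- inverted index: token -> list of indices (in order) of the names containing it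
def buildIndexAlt (characters : List String) : PySem.Dict String (List Nat) :=
  (List.range characters.length).foldl
    (fun d i =>
      (PySem.List.dedup (pvSplitSp (characters.getD i ""))).foldl
        (fun d tok => d.modify tok [] (fun l => l ++ [i])) d)
    PySem.Dict.empty

-- resolve one mention: intersect the posting lists of its tokens, then best = longest, first wins
def resolveAlt (index : PySem.Dict String (List Nat)) (characters : List String) (s : String) :
    Option String :=
  let toks := pvSplitSp s
  let cands := toks.tail.foldl
    (fun cands tok =>
      let posting : PySem.Set Nat := PySem.Set.ofList (index.getD tok [])
      cands.filter (fun i => posting.contains i))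
    (index.getD (toks.headD "") [])
  let st := cands.foldl
    (fun (st : Int × Option String) i =>
      let ch := characters.getD i ""
      if ((pvSplitSp ch).length : Int) > st.1 then (((pvSplitSp ch).length : Int), some ch) else st)
    (0, none)
  st.2

def aggregate_characters_alt (characters : List String) : List (String × Int) :=
  let index := buildIndexAlt characters
  (characters.foldl
    (fun (d : PySem.Dict String Int) ch =>
      let full := (resolveAlt index characters ch).getD ""
      d.insert full (d.getD full 0 + 1))
    PySem.Dict.empty).items

-- ===== PRECONDITION & SPEC =====
def Spec_aggregate_characters (characters : List String) (out : List (String × Int)) : Prop := out = aggregate_characters_alt characters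
instance (characters : List String) (out : List (String × Int)) : Decidable (Spec_aggregate_characters characters out) := by unfold Spec_aggregate_characters; infer_instance

-- ===== CLAIM (what is proved, stated in full; the proofs are below) =====
def Claim_equal_aggregate_characters : Prop := ∀ (characters : List String), Dom_aggregate_characters characters → Spec_aggregate_characters characters (aggregate_characters characters)

-- ===== LEMMAS AND PROOFS =====

-- splitOn's worker always produces at least one piece
lemma splitOn_go_ne_nil (sep : List Char) : ∀ (fuel : Nat) (l cur : List Char)
    (acc : List (List Char)), PySem.Chars.splitOn.go sep fuel l cur acc ≠ [] := by
  intro fuel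
  induction fuel with
  | zero => intro l cur acc; simp [PySem.Chars.splitOn.go]
  | succ n ih =>
    intro l cur acc
    cases l with
    | nil => simp [PySem.Chars.splitOn.go]
    | cons c rest =>
      rw [PySem.Chars.splitOn.go]
      split
      · exact ih _ _ _
      · exact ih _ _ _

-- Python's split(' ') never yields the empty list
lemma pvSplitSp_ne_nil (s : String) : pvSplitSp s ≠ [] := by
  unfold pvSplitSp
  simp [PySem.Str.split?, PySem.Chars.split?, PySem.Chars.splitOn]
  intro h
  exact absurd (congrArg List.length h)
    (by simpa using splitOn_go_ne_nil _ _ _ _ _ ∘ List.length_eq_zero_iff.mp)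

-- the inner token loop appends i to exactly the postings of the (distinct) tokens of one name
lemma buildIndexAlt_inner (ts : List String) (hnd : ts.Nodup) (d : PySem.Dict String (List Nat))
    (i : Nat) (tok : String) :
    (ts.foldl (fun d tok' => d.modify tok' [] (fun l => l ++ [i])) d).getD tok []
      = d.getD tok [] ++ (if tok ∈ ts then [i] else []) := by
  have h : ts.foldl (fun d tok' => d.modify tok' [] (fun l => l ++ [i])) d
      = (ts.map (fun t => (t, i))).foldl (fun d p => d.modify p.1 [] (fun l => l ++ [p.2])) d := by
    rw [List.foldl_map]
  rw [h, PySem.Dict.getD_foldl_modify_append]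
  congr 1
  rw [List.filter_map]
  have hcomp : List.filter ((fun p => p.1 == tok) ∘ fun t => (t, i)) ts
      = ts.filter (fun t => t == tok) := by
    apply List.filter_congr; intro a _; simp
  rw [hcomp]
  by_cases hm : tok ∈ ts
  · rw [List.filter_beq, List.count_eq_one_of_mem hnd hm]
    simp [hm]
  · have h1 : ts.filter (fun t => t == tok) = [] := by
      simp only [List.filter_eq_nil_iff, beq_iff_eq]
      intro t ht e; exact hm (e ▸ ht)
    rw [h1]; simp [hm]

-- the index loop over any index list, from any starting dict
lemma buildIndexAlt_go (characters : List String) (tok : String) :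
    ∀ (is : List Nat) (d : PySem.Dict String (List Nat)),
    (is.foldl (fun d i =>
        (PySem.List.dedup (pvSplitSp (characters.getD i ""))).foldl
          (fun d tok' => d.modify tok' [] (fun l => l ++ [i])) d) d).getD tok []
      = d.getD tok [] ++ is.filter (fun i => decide (tok ∈ pvSplitSp (characters.getD i ""))) := by
  intro is
  induction is with
  | nil => simp
  | cons i rest ih =>
    intro d
    simp only [List.foldl_cons, List.filter_cons]
    rw [ih, buildIndexAlt_inner _ (PySem.List.nodup_dedup _)]
    simp only [PySem.List.mem_dedup]
    split <;> simp <;> assumption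

-- the finished index: posting list of tok = the indices (in order) whose name contains tok
lemma buildIndexAlt_getD (characters : List String) (tok : String) :
    (buildIndexAlt characters).getD tok []
      = (List.range characters.length).filter
          (fun i => decide (tok ∈ pvSplitSp (characters.getD i ""))) := by
  unfold buildIndexAlt
  rw [buildIndexAlt_go]
  simp

-- membership in a posting list, for an index inside the range
lemma contains_posting (characters : List String) (i : Nat) (hi : i < characters.length)
    (tok : String) :
    (PySem.Set.ofList ((buildIndexAlt characters).getD tok [])).contains i
      = decide (tok ∈ pvSplitSp (characters.getD i "")) := by
  rw [PySem.Set.contains_eq_decide, decide_eq_decide]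
  simp [PySem.Set.mem_ofList, buildIndexAlt_getD, List.mem_filter, List.mem_range, hi]

-- intersecting posting lists = filtering the range by "contains every token"
lemma cands_go (characters : List String) :
    ∀ (tl : List String) (p : Nat → Bool),
    tl.foldl
      (fun cands tok =>
        cands.filter (fun i =>
          (PySem.Set.ofList ((buildIndexAlt characters).getD tok [])).contains i))
      ((List.range characters.length).filter p)
    = (List.range characters.length).filter
        (fun i => p i && tl.all (fun t => decide (t ∈ pvSplitSp (characters.getD i "")))) := by
  intro tl
  induction tl with
  | nil => intro p; simp
  | cons t rest ih =>
    intro p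
    simp only [List.foldl_cons]
    rw [List.filter_filter]
    have hstep : (List.range characters.length).filter
        (fun i => (PySem.Set.ofList ((buildIndexAlt characters).getD t [])).contains i && p i)
      = (List.range characters.length).filter
        (fun i => p i && decide (t ∈ pvSplitSp (characters.getD i ""))) := by
      apply List.filter_congr
      intro i hi
      rw [contains_posting characters i (List.mem_range.mp hi), Bool.and_comm]
    rw [hstep, ih]
    apply List.filter_congr
    intro i _
    simp only [List.all_cons]
    rw [Bool.eq_iff_iff]
    simp
    tauto

-- reading a list back off by index
lemma map_getD_range (xs : List String) :
    (List.range xs.length).map (fun i => xs.getD i "") = xs := by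
  apply List.ext_getElem
  · simp
  · intro i h1 h2
    simp [List.getD_eq_getElem?_getD, List.getElem?_eq_getElem h2]

-- the resolver agrees with A's get_full_name on every string
lemma resolveAlt_eq (characters : List String) (s : String) :
    (resolveAlt (buildIndexAlt characters) characters s).getD "" = get_full_name s characters := by
  unfold resolveAlt get_full_name
  obtain ⟨h, tl, htoks⟩ : ∃ h tl, pvSplitSp s = h :: tl := by
    cases hc : pvSplitSp s with
    | nil => exact absurd hc (pvSplitSp_ne_nil s)
    | cons a b => exact ⟨a, b, rfl⟩
  simp only [htoks, List.tail_cons, List.headD_cons]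
  rw [buildIndexAlt_getD characters h, cands_go]
  have hcands : (List.range characters.length).filter
      (fun i => decide (h ∈ pvSplitSp (characters.getD i ""))
        && tl.all (fun t => decide (t ∈ pvSplitSp (characters.getD i ""))))
    = (List.range characters.length).filter
      (fun i => decide (∀ t ∈ h :: tl, t ∈ pvSplitSp (characters.getD i ""))) := by
    apply List.filter_congr
    intro i _
    rw [Bool.eq_iff_iff]
    simp
  rw [hcands, ← PySem.List.foldl_if_eq_foldl_filter]
  conv_rhs => rw [← map_getD_range characters, List.foldl_map]
  congr 2
  apply PySem.List.foldl_congr_mem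
  intro st i _
  have hsub : PySem.Set.issubset (PySem.Set.ofList (h :: tl))
      (PySem.Set.ofList (pvSplitSp (characters.getD i "")))
    = decide (∀ t ∈ h :: tl, t ∈ pvSplitSp (characters.getD i "")) := by
    rw [Bool.eq_iff_iff]
    simp [PySem.Set.issubset_iff, PySem.Set.mem_ofList]
  simp only [hsub]

-- ===== VERDICT (by name: the statement is the Claim_ definition above) =====
theorem aggregate_characters_spec : Claim_equal_aggregate_characters := by
  intro characters _
  unfold Spec_aggregate_characters aggregate_characters aggregate_characters_alt
  congr 1
  apply PySem.List.foldl_congr_mem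
  intro d ch _
  simp only [resolveAlt_eq]
  by_cases hc : d.contains (get_full_name ch characters)
  · simp [hc]
  · simp [hc, PySem.Dict.getD_of_not_contains _ _ (by simpa using hc)]
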